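-- pv_equiv track=rewrite | github.com/liupengsay/PyIsTheBestLang | src/mathmatics/high_precision.py | lc_2217
-- ===== SOURCE A (Python) =====
-- def lc_2217(left: int, right: int) -> str:
--     # 模板：大数计算或者前后缀模拟计算
--     mod = 10 ** 20
--     base = 10 ** 10
--     zero = 0
--     suffix = 1
--     for x in range(left, right + 1):
--         suffix *= x
--         while suffix % 10 == 0:
--             zero += 1
--             suffix //= 10
--
--         suffix %= mod
--
--     prefix = 1
--     for x in range(left, right + 1):
--         prefix *= x
--         while prefix % 10 == 0:
--             prefix //= 10
--
--         while prefix > mod: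
--             prefix //= 10
--
--     if prefix >= base:
--         return str(prefix)[:5] + "..." + str(suffix)[-5:] + "e" + str(zero)
--     else:
--         return str(prefix) + "e" + str(zero)
-- ===== SOURCE B (Python) =====
-- MOD = 10 ** 20
--
--
-- def _split10(n):
--     """Return (n // 10**e, e) for the largest e with 10**e dividing n,
--     found by repeatedly squaring the trial divisor (binary lifting)."""
--     if n % 10:
--         return n, 0
--     p, e = 10, 1
--     while n % (p * p) == 0:
--         p, e = p * p, e + e
--     m, k = _split10(n // p)
--     return m, e + k
--
--
-- def _cap(p):
--     """Floor-divide p by 10 until p <= MOD, jumping by squared powers of ten."""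
--     while p > MOD:
--         d = 10
--         while p // (d * d) > MOD:
--             d = d * d
--         p //= d
--     return p
--
--
-- def lc_2217(left: int, right: int) -> str:
--     base = 10 ** 10
--     prefix, suffix, zero = 1, 1, 0
--     for x in range(left, right + 1):
--         suffix, k = _split10(suffix * x)
--         zero += k
--         suffix %= MOD
--         prefix = _cap(_split10(prefix * x)[0])
--     if prefix >= base:
--         return str(prefix)[:5] + "..." + str(suffix)[-5:] + "e" + str(zero)
--     return str(prefix) + "e" + str(zero)
-- ===== Notes on version B (the rewrite author's own statement) =====
-- stated objective: alternative
-- what changed: B fuses A's two passes over range(left, right+1) into one and replaces A's digit-at-a-time while-loops by binary lifting: trailing zeros are stripped by squaring the trial divisor 10^e while it still divides the product (_split10), and the prefix is capped by squaring the divisor while the quotient still exceeds 10^20 (_cap), so each strip/cap takes O(log k) big-int divisions instead of k.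
import Mathlib
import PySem

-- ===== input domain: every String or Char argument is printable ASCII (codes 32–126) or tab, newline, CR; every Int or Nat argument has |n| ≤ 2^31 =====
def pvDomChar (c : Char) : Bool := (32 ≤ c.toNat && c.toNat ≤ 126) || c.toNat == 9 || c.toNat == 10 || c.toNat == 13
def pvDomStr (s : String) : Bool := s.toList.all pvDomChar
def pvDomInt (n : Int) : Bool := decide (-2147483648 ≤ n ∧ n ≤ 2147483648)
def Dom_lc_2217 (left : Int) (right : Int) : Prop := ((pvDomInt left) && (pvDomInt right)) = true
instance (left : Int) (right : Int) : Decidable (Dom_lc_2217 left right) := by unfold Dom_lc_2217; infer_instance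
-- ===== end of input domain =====

-- B replaces A's per-digit while-loops (zero stripping and prefix capping, one division
-- by 10 per step) by binary lifting on the divisor — squaring 10^e until it no longer
-- fits — and fuses A's two passes over the range into a single one.

-- ===== PORT A =====

-- termination helper for the trailing-zero while-loops (cited in decreasing_by)
theorem pvFdiv10_natAbs_lt (n : Int) (h0 : ¬ n = 0) (h : PySem.Int.mod n 10 = 0) :
    (PySem.Int.floordiv n 10).natAbs < n.natAbs := by
  have hdvd : (10 : Int) ∣ n := (PySem.Int.mod_eq_zero_iff_dvd n 10).mp h
  obtain ⟨c, hc⟩ := hdvd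
  have : PySem.Int.floordiv n 10 = c := by
    rw [PySem.Int.floordiv_eq_ediv_of_pos (by norm_num), hc, Int.mul_ediv_cancel_left _ (by norm_num)]
  rw [this, hc]
  have hc0 : c ≠ 0 := by rintro rfl; simp at hc; exact h0 hc
  have : (10 * c).natAbs = 10 * c.natAbs := by simp [Int.natAbs_mul]
  omega

theorem pvCap_natAbs_lt (p : Int) (h : 10 ^ 20 < p) :
    (PySem.Int.floordiv p 10).natAbs < p.natAbs := by
  rw [PySem.Int.floordiv_eq_ediv_of_pos (by norm_num)]
  have h1 : 0 ≤ p / 10 := Int.ediv_nonneg (by positivity) (by norm_num)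
  have h2 : p / 10 < p := by
    have := Int.ediv_le_self 10 (le_of_lt (show (0:Int) < p by positivity))
    omega
  omega

-- A's first inner while-loop: strip trailing zeros of s, counting them into z
-- (guard s ≠ 0 only makes the function total: Python diverges at s = 0)
def aStripCount (s z : Int) : Int × Int :=
  if h : ¬ s = 0 ∧ PySem.Int.mod s 10 = 0 then
    aStripCount (PySem.Int.floordiv s 10) (z + 1)
  else (s, z)
termination_by s.natAbs
decreasing_by exact pvFdiv10_natAbs_lt s h.1 h.2

-- A's second inner while-loop: strip trailing zeros, no count
def aStrip (p : Int) : Int :=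
  if h : ¬ p = 0 ∧ PySem.Int.mod p 10 = 0 then aStrip (PySem.Int.floordiv p 10)
  else p
termination_by p.natAbs
decreasing_by exact pvFdiv10_natAbs_lt p h.1 h.2

-- A's third inner while-loop: while prefix > mod: prefix //= 10
def aCap (p : Int) : Int :=
  if h : 10 ^ 20 < p then aCap (PySem.Int.floordiv p 10) else p
termination_by p.natAbs
decreasing_by exact pvCap_natAbs_lt p h

-- body of A's first for-loop, state (suffix, zero)
def aStepSuffix (sz : Int × Int) (x : Int) : Int × Int :=
  let r := aStripCount (sz.1 * x) sz.2
  (PySem.Int.mod r.1 (10 ^ 20), r.2)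

-- body of A's second for-loop, state prefix
def aStepPrefix (p x : Int) : Int :=
  aCap (aStrip (p * x))

def lc_2217 (left : Int) (right : Int) : String :=
  let base : Int := 10 ^ 10
  let sz := (PySem.List.pyRange left (right + 1) 1).foldl aStepSuffix (1, 0)
  let suffix := sz.1
  let zero := sz.2
  let pre := (PySem.List.pyRange left (right + 1) 1).foldl aStepPrefix 1
  if base ≤ pre then
    PySem.Str.slice (PySem.Int.toStr pre) none (some 5) ++ "..." ++
      PySem.Str.slice (PySem.Int.toStr suffix) (some (-5)) none ++ "e" ++ PySem.Int.toStr zero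
  else
    PySem.Int.toStr pre ++ "e" ++ PySem.Int.toStr zero

-- ===== PORT B =====

-- Source B _split10's inner while: square the trial divisor p (tracking its exponent e)
-- while p*p still divides n. Fuel-based structural recursion; the fuel and the guard
-- conjuncts n ≠ 0, 10 ≤ p only make the port total (Python keeps them as invariants,
-- and diverges at n = 0).
def bSplitGrowF : Nat → Int → Int → Int → Int × Int
  | 0, _, p, e => (p, e)
  | Nat.succ f, n, p, e =>
      if n ≠ 0 ∧ 10 ≤ p ∧ PySem.Int.mod n (p * p) = 0 then bSplitGrowF f n (p * p) (e + e)
      else (p, e)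

def bSplitGrow (n p e : Int) : Int × Int := bSplitGrowF (n.natAbs + 1) n p e

-- Source B's _split10: (n // 10^e, e) for the largest e with 10^e ∣ n, by binary lifting
def bSplit10F : Nat → Int → Int × Int
  | 0, n => (n, 0)
  | Nat.succ f, n =>
      if n ≠ 0 ∧ PySem.Int.mod n 10 = 0 then
        ((bSplit10F f (PySem.Int.floordiv n (bSplitGrow n 10 1).1)).1,
         (bSplitGrow n 10 1).2 + (bSplit10F f (PySem.Int.floordiv n (bSplitGrow n 10 1).1)).2)
      else (n, 0)

def bSplit10 (n : Int) : Int × Int := bSplit10F (n.natAbs + 1) n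

-- Source B _cap's inner while: square the divisor d while p // (d*d) still exceeds 10^20
def bCapGrowF : Nat → Int → Int → Int
  | 0, _, d => d
  | Nat.succ f, p, d =>
      if 10 ≤ d ∧ 10 ^ 20 < PySem.Int.floordiv p (d * d) then bCapGrowF f p (d * d)
      else d

def bCapGrow (p d : Int) : Int := bCapGrowF (p.natAbs + 1) p d

-- Source B's _cap: floor-divide p by 10 until p ≤ 10^20, jumping by squared powers of ten
def bCapF : Nat → Int → Int
  | 0, p => p
  | Nat.succ f, p =>
      if 10 ^ 20 < p then bCapF f (PySem.Int.floordiv p (bCapGrow p 10)) else p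

def bCap (p : Int) : Int := bCapF (p.natAbs + 1) p

-- body of B's single fused loop, state (prefix, suffix, zero)
def bStep (st : Int × Int × Int) (x : Int) : Int × Int × Int :=
  let sk := bSplit10 (st.2.1 * x)
  (bCap (bSplit10 (st.1 * x)).1, PySem.Int.mod sk.1 (10 ^ 20), st.2.2 + sk.2)

def lc_2217_alt (left : Int) (right : Int) : String :=
  let base : Int := 10 ^ 10
  let st := (PySem.List.pyRange left (right + 1) 1).foldl bStep (1, 1, 0)
  if base ≤ st.1 then
    PySem.Str.slice (PySem.Int.toStr st.1) none (some 5) ++ "..." ++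
      PySem.Str.slice (PySem.Int.toStr st.2.1) (some (-5)) none ++ "e" ++ PySem.Int.toStr st.2.2
  else
    PySem.Int.toStr st.1 ++ "e" ++ PySem.Int.toStr st.2.2

-- ===== PRECONDITION & SPEC =====
-- (no Pre_: on ranges containing 0 both Pythons diverge identically, and the ports'
-- totality guards make both ports return the same value there too)
def Spec_lc_2217 (left : Int) (right : Int) (out : String) : Prop := out = lc_2217_alt left right
instance (left : Int) (right : Int) (out : String) : Decidable (Spec_lc_2217 left right out) := by unfold Spec_lc_2217; infer_instance

-- ===== CLAIM (what is proved, stated in full; the proofs are below) =====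
def Claim_equal_lc_2217 : Prop := ∀ (left : Int) (right : Int), Dom_lc_2217 left right → Spec_lc_2217 left right (lc_2217 left right)

-- ===== LEMMAS AND PROOFS =====

-- floor-division by powers of ten composes
theorem pvFdiv_fdiv (p : Int) (a b : Nat) :
    PySem.Int.floordiv (PySem.Int.floordiv p ((10:Int) ^ a)) ((10:Int) ^ b) =
      PySem.Int.floordiv p ((10:Int) ^ (a + b)) := by
  rw [PySem.Int.floordiv_eq_ediv_of_pos (by positivity),
    PySem.Int.floordiv_eq_ediv_of_pos (by positivity),
    PySem.Int.floordiv_eq_ediv_of_pos (by positivity),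
    Int.ediv_ediv_of_nonneg (by positivity), ← pow_add]

theorem pvFdiv_one (p : Int) : PySem.Int.floordiv p ((10:Int) ^ (0:Nat)) = p := by
  rw [pow_zero, PySem.Int.floordiv_eq_ediv_of_pos (by norm_num), Int.ediv_one]

-- dividing by a smaller power of ten gives a larger quotient (for positive p)
theorem pvFdivPow_gt (p : Int) (hp : 0 < p) (i j : Nat) (hij : j ≤ i)
    (h : 10 ^ 20 < PySem.Int.floordiv p ((10:Int) ^ i)) :
    10 ^ 20 < PySem.Int.floordiv p ((10:Int) ^ j) := by
  have hco : PySem.Int.floordiv p ((10:Int) ^ i) =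
      PySem.Int.floordiv (PySem.Int.floordiv p ((10:Int) ^ j)) ((10:Int) ^ (i - j)) := by
    rw [pvFdiv_fdiv, Nat.add_sub_cancel' hij]
  have hnn : 0 ≤ PySem.Int.floordiv p ((10:Int) ^ j) := by
    rw [PySem.Int.floordiv_eq_ediv_of_pos (by positivity)]
    exact Int.ediv_nonneg hp.le (by positivity)
  have hle : PySem.Int.floordiv (PySem.Int.floordiv p ((10:Int) ^ j)) ((10:Int) ^ (i - j)) ≤
      PySem.Int.floordiv p ((10:Int) ^ j) := by
    rw [PySem.Int.floordiv_eq_ediv_of_pos (a := PySem.Int.floordiv p ((10:Int) ^ j)) (by positivity)]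
    exact Int.ediv_le_self _ hnn
  omega

-- whatever its fuel, bSplitGrowF returns an exact power of ten (and its exponent)
-- dividing n: stopping early only yields a smaller power, which the spec still allows
theorem bSplitGrowF_spec (f : Nat) : ∀ (n p e : Int) (k : Nat), p = 10 ^ k → e = (k : Int) →
    1 ≤ k → p ∣ n →
    ∃ K : Nat, bSplitGrowF f n p e = ((10:Int) ^ K, (K : Int)) ∧ (10:Int) ^ K ∣ n ∧ 1 ≤ K := by
  induction f with
  | zero =>
      intro n p e k hk he h1 hd
      exact ⟨k, by rw [bSplitGrowF, hk, he], by rw [← hk]; exact hd, h1⟩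
  | succ f ih =>
      intro n p e k hk he h1 hd
      rw [bSplitGrowF]
      by_cases h : n ≠ 0 ∧ 10 ≤ p ∧ PySem.Int.mod n (p * p) = 0
      · rw [if_pos h]
        exact ih n (p * p) (e + e) (k + k) (by rw [hk, ← pow_add]) (by push_cast [he]; ring)
          (by omega) ((PySem.Int.mod_eq_zero_iff_dvd n (p * p)).mp h.2.2)
      · rw [if_neg h]
        exact ⟨k, by rw [hk, he], by rw [← hk]; exact hd, h1⟩

theorem bSplitGrow_spec (n : Int) (hd : (10:Int) ∣ n) :
    ∃ K : Nat, bSplitGrow n 10 1 = ((10:Int) ^ K, (K : Int)) ∧ (10:Int) ^ K ∣ n ∧ 1 ≤ K :=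
  bSplitGrowF_spec (n.natAbs + 1) n 10 1 1 (by norm_num) (by norm_num) le_rfl hd

-- one outer round of _split10 strictly shrinks |n|
theorem pvSplit_fdiv_natAbs_lt (n : Int) (h0 : ¬ n = 0) (h10 : PySem.Int.mod n 10 = 0) :
    (PySem.Int.floordiv n (bSplitGrow n 10 1).1).natAbs < n.natAbs := by
  obtain ⟨K, heq, hdvd, hK⟩ := bSplitGrow_spec n ((PySem.Int.mod_eq_zero_iff_dvd n 10).mp h10)
  have hge : (10:Int) ≤ (bSplitGrow n 10 1).1 := by
    rw [heq]
    calc (10:Int) = 10 ^ 1 := (pow_one 10).symm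
      _ ≤ 10 ^ K := pow_le_pow_right₀ (by norm_num) hK
  have hdvd' : (bSplitGrow n 10 1).1 ∣ n := by rw [heq]; exact hdvd
  set g := (bSplitGrow n 10 1).1 with hg
  obtain ⟨c, hc⟩ := hdvd'
  have hc0 : c ≠ 0 := by rintro rfl; simp at hc; exact h0 hc
  have hq : PySem.Int.floordiv n g = c := by
    rw [PySem.Int.floordiv_eq_ediv_of_pos (by omega), hc,
      Int.mul_ediv_cancel_left _ (by omega)]
  rw [hq, hc]
  have h1 : (g * c).natAbs = g.natAbs * c.natAbs := Int.natAbs_mul _ _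
  have h2 : 10 ≤ g.natAbs := by omega
  have h3 : 1 ≤ c.natAbs := Int.natAbs_pos.mpr hc0
  have h4 : 10 * c.natAbs ≤ g.natAbs * c.natAbs := Nat.mul_le_mul_right _ h2
  omega

-- e steps of A's counting strip loop, taken at once for an exact power-of-ten divisor
theorem aStripCount_pow (k : Nat) : ∀ (n z : Int), 1 ≤ k → (10:Int) ^ k ∣ n → n ≠ 0 →
    aStripCount n z = aStripCount (PySem.Int.floordiv n ((10:Int) ^ k)) (z + (k : Int)) := by
  induction k with
  | zero => intro n z h; omega
  | succ k ih =>
      intro n z _ hd hn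
      have h10 : (10:Int) ∣ n := dvd_trans (dvd_pow_self 10 (Nat.succ_ne_zero k)) hd
      have hmod : PySem.Int.mod n 10 = 0 := (PySem.Int.mod_eq_zero_iff_dvd n 10).mpr h10
      rw [aStripCount, dif_pos ⟨hn, hmod⟩]
      obtain ⟨c, rfl⟩ := hd
      have hc : c ≠ 0 := by rintro rfl; simp at hn
      have hstep : PySem.Int.floordiv ((10:Int) ^ (k + 1) * c) 10 = 10 ^ k * c := by
        rw [PySem.Int.floordiv_eq_ediv_of_pos (by norm_num), pow_succ,
          show (10:Int) ^ k * 10 * c = 10 * ((10:Int) ^ k * c) by ring,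
          Int.mul_ediv_cancel_left _ (by norm_num)]
      have hq : PySem.Int.floordiv ((10:Int) ^ (k + 1) * c) ((10:Int) ^ (k + 1)) = c := by
        rw [PySem.Int.floordiv_eq_ediv_of_pos (by positivity),
          Int.mul_ediv_cancel_left _ (by positivity)]
      rw [hstep, hq]
      by_cases hk0 : k = 0
      · subst hk0
        norm_num
      · have hq2 : PySem.Int.floordiv ((10:Int) ^ k * c) ((10:Int) ^ k) = c := by
          rw [PySem.Int.floordiv_eq_ediv_of_pos (by positivity),
            Int.mul_ediv_cancel_left _ (by positivity)]
        have := ih ((10:Int) ^ k * c) (z + 1) (by omega)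
          (Dvd.intro c rfl) (by positivity)
        rw [this, hq2]
        congr 1
        push_cast; ring

-- A's counting strip loop is B's _split10 (fuel induction; any fuel above |n| is enough)
theorem bSplit_eqF (f : Nat) : ∀ (n z : Int), n.natAbs < f →
    aStripCount n z = ((bSplit10F f n).1, z + (bSplit10F f n).2) := by
  induction f with
  | zero => intro n z h; omega
  | succ f ih =>
      intro n z hf
      by_cases h : n ≠ 0 ∧ PySem.Int.mod n 10 = 0
      · obtain ⟨K, heq, hdvd, hK⟩ := bSplitGrow_spec n ((PySem.Int.mod_eq_zero_iff_dvd n 10).mp h.2)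
        have hfix1 : (bSplitGrow n 10 1).1 = (10:Int) ^ K := by rw [heq]
        have hfix2 : (bSplitGrow n 10 1).2 = (K : Int) := by rw [heq]
        have hlt := pvSplit_fdiv_natAbs_lt n h.1 h.2
        rw [hfix1] at hlt
        rw [bSplit10F, if_pos h, hfix1, hfix2]
        rw [aStripCount_pow K n z hK hdvd h.1]
        rw [ih (PySem.Int.floordiv n ((10:Int) ^ K)) (z + (K : Int)) (by omega)]
        simp [Prod.ext_iff]
        ring
      · rw [aStripCount, dif_neg h, bSplit10F, if_neg h]
        simp

theorem bSplit_eq (n z : Int) : aStripCount n z = ((bSplit10 n).1, z + (bSplit10 n).2) :=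
  bSplit_eqF (n.natAbs + 1) n z (by omega)

-- A's uncounted strip loop is the first component of the counting one
theorem aStrip_eq_fst (p : Int) : ∀ z : Int, aStrip p = (aStripCount p z).1 := by
  fun_induction aStrip p with
  | case1 p h ih =>
      intro z
      rw [aStripCount, dif_pos h]
      exact ih (z + 1)
  | case2 p h =>
      intro z
      rw [aStripCount, dif_neg h]

-- k steps of A's cap loop, taken at once
theorem aCap_pow (k : Nat) : ∀ p : Int,
    (∀ j : Nat, j < k → 10 ^ 20 < PySem.Int.floordiv p ((10:Int) ^ j)) →
    aCap p = aCap (PySem.Int.floordiv p ((10:Int) ^ k)) := by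
  induction k with
  | zero => intro p _; rw [pvFdiv_one]
  | succ k ih =>
      intro p H
      have h0 : 10 ^ 20 < p := by have := H 0 (by omega); rwa [pvFdiv_one] at this
      rw [aCap, dif_pos h0]
      have hten : PySem.Int.floordiv p 10 = PySem.Int.floordiv p ((10:Int) ^ (1:Nat)) := by
        norm_num
      rw [hten]
      have H' : ∀ j : Nat, j < k →
          10 ^ 20 < PySem.Int.floordiv (PySem.Int.floordiv p ((10:Int) ^ (1:Nat))) ((10:Int) ^ j) := by
        intro j hj
        rw [pvFdiv_fdiv]
        exact H (1 + j) (by omega)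
      rw [ih _ H', pvFdiv_fdiv, Nat.add_comm]

-- whatever its fuel, bCapGrowF only grows the divisor
theorem bCapGrowF_ge (f : Nat) : ∀ p d : Int, d ≤ bCapGrowF f p d := by
  induction f with
  | zero => intro p d; rw [bCapGrowF]
  | succ f ih =>
      intro p d
      rw [bCapGrowF]
      by_cases h : 10 ≤ d ∧ 10 ^ 20 < PySem.Int.floordiv p (d * d)
      · rw [if_pos h]
        have := ih p (d * d)
        nlinarith [h.1]
      · rw [if_neg h]

-- whatever its fuel, bCapGrowF returns 10^K with every smaller power still over the bound
theorem bCapGrowF_spec (f : Nat) : ∀ (p d : Int) (k : Nat), d = 10 ^ k → 1 ≤ k →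
    (∀ j : Nat, j < k → 10 ^ 20 < PySem.Int.floordiv p ((10:Int) ^ j)) →
    ∃ K : Nat, bCapGrowF f p d = 10 ^ K ∧ 1 ≤ K ∧
      ∀ j : Nat, j < K → 10 ^ 20 < PySem.Int.floordiv p ((10:Int) ^ j) := by
  induction f with
  | zero =>
      intro p d k hk h1 H
      exact ⟨k, by rw [bCapGrowF, hk], h1, H⟩
  | succ f ih =>
      intro p d k hk h1 H
      rw [bCapGrowF]
      by_cases h : 10 ≤ d ∧ 10 ^ 20 < PySem.Int.floordiv p (d * d)
      · rw [if_pos h]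
        have hp : 0 < p := by
          have := H 0 (by omega); rw [pvFdiv_one] at this; positivity
        have hdd : d * d = (10:Int) ^ (k + k) := by rw [hk, ← pow_add]
        refine ih p (d * d) (k + k) hdd (by omega) ?_
        intro j hj
        exact pvFdivPow_gt p hp (k + k) j (by omega) (by rw [← hdd]; exact h.2)
      · rw [if_neg h]
        exact ⟨k, hk, h1, H⟩

theorem bCapGrow_spec (p : Int) (hp : 10 ^ 20 < p) :
    ∃ K : Nat, bCapGrow p 10 = 10 ^ K ∧ 1 ≤ K ∧
      ∀ j : Nat, j < K → 10 ^ 20 < PySem.Int.floordiv p ((10:Int) ^ j) :=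
  bCapGrowF_spec (p.natAbs + 1) p 10 1 (by norm_num) le_rfl
    (by intro j hj
        have : j = 0 := by omega
        subst this; rwa [pvFdiv_one])

-- one outer round of _cap strictly shrinks |p|
theorem pvCapStep_natAbs_lt (p : Int) (h : 10 ^ 20 < p) :
    (PySem.Int.floordiv p (bCapGrow p 10)).natAbs < p.natAbs := by
  have hg : (10:Int) ≤ bCapGrow p 10 := bCapGrowF_ge (p.natAbs + 1) p 10
  rw [PySem.Int.floordiv_eq_ediv_of_pos (by omega)]
  have h1 : 0 ≤ p / bCapGrow p 10 := Int.ediv_nonneg (by positivity) (by omega)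
  have h2 : p / bCapGrow p 10 < p := by
    rw [Int.ediv_lt_iff_lt_mul (by omega)]; nlinarith
  omega

-- A's cap loop is B's _cap (fuel induction; any fuel above |p| is enough)
theorem aCap_eqF (f : Nat) : ∀ p : Int, p.natAbs < f → aCap p = bCapF f p := by
  induction f with
  | zero => intro p h; omega
  | succ f ih =>
      intro p hf
      by_cases h : 10 ^ 20 < p
      · obtain ⟨K, hg, hK1, H⟩ := bCapGrow_spec p h
        have hlt := pvCapStep_natAbs_lt p h
        rw [bCapF, if_pos h]
        rw [aCap_pow K p H, show (10:Int) ^ K = bCapGrow p 10 from hg.symm]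
        exact ih _ (by omega)
      · rw [aCap, dif_neg h, bCapF, if_neg h]

theorem aCap_eq (p : Int) : aCap p = bCap p :=
  aCap_eqF (p.natAbs + 1) p (by omega)

-- B's fused step is A's two independent steps side by side
theorem bStep_eq (st : Int × Int × Int) (x : Int) :
    bStep st x = (aStepPrefix st.1 x, aStepSuffix (st.2.1, st.2.2) x) := by
  obtain ⟨p, s, z⟩ := st
  show bStep (p, s, z) x = _
  have hsuf := bSplit_eq (s * x) z
  have hpre := bSplit_eq (p * x) 0
  simp only [bStep, aStepPrefix, aStepSuffix, hsuf]
  rw [aStrip_eq_fst (p * x) 0, hpre, aCap_eq]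

-- fusing A's two independent folds into one fold over the product state
theorem fold_fuse (l : List Int) (p s z : Int) :
    l.foldl bStep (p, s, z) = (l.foldl aStepPrefix p, l.foldl aStepSuffix (s, z)) := by
  induction l generalizing p s z with
  | nil => rfl
  | cons x xs ih =>
      simp only [List.foldl_cons]
      rw [bStep_eq (p, s, z) x]
      exact ih _ _ _

-- ===== VERDICT (by name: the statement is the Claim_ definition above) =====
theorem lc_2217_spec : Claim_equal_lc_2217 := by
  intro left right _
  unfold Spec_lc_2217 lc_2217 lc_2217_alt
  rw [fold_fuse]
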